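-- pv_equiv track=rewrite | github.com/I-Leonid-I/ITAI-Assignment-1-Report | interactor.py | nazgul_zone
-- ===== SOURCE A (Python) =====
-- from typing import Dict, Iterable, List, Optional, Sequence, Tuple
--
-- SIZE = 13
--
-- def inside(x: int, y: int) -> bool:
--     return 0 <= x < SIZE and 0 <= y < SIZE
--
-- def moore(radius: int) -> List[Tuple[int, int]]:
--     return [
--         (dx, dy)
--         for dx in range(-radius, radius + 1)
--         for dy in range(-radius, radius + 1)
--         if max(abs(dx), abs(dy)) <= radius
--     ]
--
-- def translate(pos: Tuple[int, int], offsets: Iterable[Tuple[int, int]]) -> List[Tuple[int, int]]: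
--     x, y = pos
--     return [(x + dx, y + dy) for dx, dy in offsets if inside(x + dx, y + dy)]
--
-- def nazgul_zone(pos: Tuple[int, int], ring_on: bool, has_coat: bool) -> set[Tuple[int, int]]:
--     if ring_on:
--         zone = set(translate(pos, moore(2)))
--         ears = [(3, 0), (-3, 0), (0, 3), (0, -3)]
--         zone.update([p for p in translate(pos, ears)])
--         return zone
--     if has_coat:
--         return set(translate(pos, moore(1)))
--     zone = set(translate(pos, moore(1)))
--     ears = [(2, 0), (-2, 0), (0, 2), (0, -2)]
--     zone.update([p for p in translate(pos, ears)])
--     return zone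
-- ===== SOURCE B (Python) =====
-- def nazgul_zone(pos, ring_on, has_coat):
--     x, y = pos
--     r = 2 if ring_on else 1
--     zone = {(cx, cy)
--             for cx in range(13)
--             for cy in range(13)
--             if max(abs(cx - x), abs(cy - y)) <= r}
--     if ring_on or not has_coat:
--         for ux, uy in ((1, 0), (-1, 0), (0, 1), (0, -1)):
--             ex, ey = x + (r + 1) * ux, y + (r + 1) * uy
--             if 0 <= ex < 13 and 0 <= ey < 13:
--                 zone.add((ex, ey))
--     return zone
-- ===== Notes on version B (the rewrite author's own statement) =====
-- stated objective: alternative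
-- what changed: Replaced the offset-table pipeline (moore/translate helpers building offset lists and shifting them onto the board) by a direct predicate scan: iterate over all 13x13 board cells and keep those at Chebyshev distance <= r from pos (r=2 if ring_on else 1), then add the four cardinal 'ear' cells at distance r+1 when ring_on or no coat.
import Mathlib
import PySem

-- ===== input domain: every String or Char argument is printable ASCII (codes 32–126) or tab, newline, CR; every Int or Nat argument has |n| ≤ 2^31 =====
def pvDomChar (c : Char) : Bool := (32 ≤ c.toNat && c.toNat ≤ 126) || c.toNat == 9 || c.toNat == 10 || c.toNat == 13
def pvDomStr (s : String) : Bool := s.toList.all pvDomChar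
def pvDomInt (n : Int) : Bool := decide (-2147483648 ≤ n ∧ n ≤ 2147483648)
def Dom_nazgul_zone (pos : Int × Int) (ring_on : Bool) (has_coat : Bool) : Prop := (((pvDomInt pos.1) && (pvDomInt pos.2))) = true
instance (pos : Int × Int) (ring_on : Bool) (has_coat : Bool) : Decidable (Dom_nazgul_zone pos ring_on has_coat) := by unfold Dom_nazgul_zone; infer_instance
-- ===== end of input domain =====

-- B replaces A's offset-table helpers (moore/translate) by a direct predicate scan of the
-- 13x13 board (Chebyshev disc plus the four cardinal 'ear' cells); alternative decomposition, not faster.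


-- ===== PORT A =====
def pyInside (x y : Int) : Bool := decide (0 ≤ x ∧ x < 13) && decide (0 ≤ y ∧ y < 13)

def moorePort (radius : Int) : List (Int × Int) :=
  (PySem.List.pyRange (-radius) (radius + 1) 1).flatMap (fun dx =>
    ((PySem.List.pyRange (-radius) (radius + 1) 1).filter
        (fun dy => decide (max |dx| |dy| ≤ radius))).map (fun dy => (dx, dy)))

def translatePort (pos : Int × Int) (offs : List (Int × Int)) : List (Int × Int) :=
  (offs.filter (fun o => pyInside (pos.1 + o.1) (pos.2 + o.2))).map
    (fun o => (pos.1 + o.1, pos.2 + o.2))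

def nazgul_zone (pos : Int × Int) (ring_on : Bool) (has_coat : Bool) : List (Int × Int) :=
  if ring_on then
    PySem.Set.update (PySem.Set.ofList (translatePort pos (moorePort 2)))
      (translatePort pos [(3, 0), (-3, 0), (0, 3), (0, -3)])
  else if has_coat then
    PySem.Set.ofList (translatePort pos (moorePort 1))
  else
    PySem.Set.update (PySem.Set.ofList (translatePort pos (moorePort 1)))
      (translatePort pos [(2, 0), (-2, 0), (0, 2), (0, -2)])

-- ===== PORT B =====
def nazgul_zone_alt (pos : Int × Int) (ring_on : Bool) (has_coat : Bool) : List (Int × Int) :=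
  let x := pos.1
  let y := pos.2
  let r : Int := if ring_on then 2 else 1
  let zone : PySem.Set (Int × Int) := PySem.Set.ofList
    ((PySem.List.pyRange 0 13 1).flatMap (fun cx =>
      ((PySem.List.pyRange 0 13 1).filter
          (fun cy => decide (max |cx - x| |cy - y| ≤ r))).map (fun cy => (cx, cy))))
  if ring_on || !has_coat then
    [((1 : Int), (0 : Int)), (-1, 0), (0, 1), (0, -1)].foldl (fun z u =>
      let ex := x + (r + 1) * u.1
      let ey := y + (r + 1) * u.2
      if (0 ≤ ex ∧ ex < 13) ∧ (0 ≤ ey ∧ ey < 13) then PySem.Set.add z (ex, ey) else z) zone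
  else zone

-- ===== PRECONDITION & SPEC =====
def Spec_nazgul_zone (pos : Int × Int) (ring_on : Bool) (has_coat : Bool) (out : List (Int × Int)) : Prop := out = nazgul_zone_alt pos ring_on has_coat
instance (pos : Int × Int) (ring_on : Bool) (has_coat : Bool) (out : List (Int × Int)) : Decidable (Spec_nazgul_zone pos ring_on has_coat out) := by unfold Spec_nazgul_zone; infer_instance

-- ===== CLAIM (what is proved, stated in full; the proofs are below) =====
def Claim_equal_nazgul_zone : Prop := ∀ (pos : Int × Int) (ring_on : Bool) (has_coat : Bool), Dom_nazgul_zone pos ring_on has_coat → Spec_nazgul_zone pos ring_on has_coat (nazgul_zone pos ring_on has_coat)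

-- ===== LEMMAS AND PROOFS =====

/-- the lexicographically ordered enumeration of the rectangle [a,b) x [c,d) -/
def pvGrid (a b c d : Int) : List (Int × Int) :=
  (PySem.List.pyRange a b 1).flatMap (fun cx =>
    (PySem.List.pyRange c d 1).map (fun cy => (cx, cy)))

lemma fm_congr {α β : Type} {l : List α} {f g : α → List β}
    (h : ∀ a ∈ l, f a = g a) : l.flatMap f = l.flatMap g := by
  induction l with
  | nil => rfl
  | cons a l ih =>
    rw [List.flatMap_cons, List.flatMap_cons, h a (by simp),
        ih (fun a ha => h a (by simp [ha]))]

lemma flatMap_if {α β : Type} (p : α → Bool) (f : α → List β) (l : List α) :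
    (l.flatMap (fun a => if p a then f a else [])) = (l.filter p).flatMap f := by
  induction l with
  | nil => rfl
  | cons a l ih => by_cases h : p a = true <;> simp [h, ih]

lemma filter_and_const {α : Type} (b : Bool) (q : α → Bool) (l : List α) :
    l.filter (fun a => b && q a) = if b then l.filter q else [] := by
  cases b <;> simp

lemma map_shift (x a b : Int) :
    (PySem.List.pyRange a b 1).map (fun t => x + t) = PySem.List.pyRange (x + a) (x + b) 1 := by
  rw [PySem.List.pyRange_one, PySem.List.pyRange_one, List.map_map]
  have h : (x + b - (x + a)).toNat = (b - a).toNat := by omega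
  rw [h]
  refine List.map_congr_left (fun k _ => ?_)
  simp [Function.comp]
  ring

lemma filter_inter (c d : Int) : ∀ (n : Nat) (a b : Int), (b - a).toNat = n →
    (PySem.List.pyRange a b 1).filter (fun t => decide (c ≤ t ∧ t < d)) =
      PySem.List.pyRange (max a c) (min b d) 1 := by
  intro n
  induction n with
  | zero =>
    intro a b h
    rw [PySem.List.pyRange_one_eq_nil (by omega : b ≤ a),
        PySem.List.pyRange_one_eq_nil (by omega : min b d ≤ max a c)]
    rfl
  | succ n ih =>
    intro a b h
    rw [PySem.List.pyRange_one_cons (by omega : a < b), List.filter_cons]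
    rw [ih (a + 1) b (by omega)]
    by_cases hc : c ≤ a ∧ a < d
    · have e1 : max a c = a := by omega
      have e2 : max (a + 1) c = a + 1 := by omega
      rw [e1, e2, PySem.List.pyRange_one_cons (by omega : a < min b d)]
      simp [hc]
    · simp only [hc, decide_false]
      by_cases hca : c ≤ a
      · rw [PySem.List.pyRange_one_eq_nil (by omega : min b d ≤ max a c),
            PySem.List.pyRange_one_eq_nil (by omega : min b d ≤ max (a + 1) c)]
        simp
      · have e1 : max a c = c := by omega
        have e2 : max (a + 1) c = c := by omega
        rw [e1, e2]
        simp

lemma shift_grid (x y : Int) (l1 l2 : List Int) :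
    l1.flatMap (fun dx => l2.map (fun dy => ((x + dx : Int), (y + dy : Int)))) =
      (l1.map (fun t => x + t)).flatMap (fun cx => (l2.map (fun t => y + t)).map (fun cy => (cx, cy))) := by
  induction l1 with
  | nil => rfl
  | cons a l ih => simp only [List.flatMap_cons, List.map_cons, List.map_map, ih]; rfl

lemma translate_append (p : Int × Int) (a b : List (Int × Int)) :
    translatePort p (a ++ b) = translatePort p a ++ translatePort p b := by
  simp [translatePort, List.filter_append]

lemma translate_row (x y c : Int) (l : List Int) :
    translatePort (x, y) (l.map (fun cy => ((c : Int), cy))) =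
      (l.filter (fun dy => pyInside (x + c) (y + dy))).map (fun dy => (x + c, y + dy)) := by
  induction l with
  | nil => rfl
  | cons a l ih =>
    by_cases h : pyInside (x + c) (y + a) = true <;>
      simp only [translatePort] at * <;>
      simp [h, ih]

lemma translate_grid (x y : Int) (l1 l2 : List Int) :
    translatePort (x, y) (l1.flatMap (fun cx => l2.map (fun cy => (cx, cy)))) =
      l1.flatMap (fun dx =>
        (l2.filter (fun dy => pyInside (x + dx) (y + dy))).map (fun dy => (x + dx, y + dy))) := by
  induction l1 with
  | nil => rfl
  | cons a l ih =>
    rw [List.flatMap_cons, translate_append, translate_row, ih, List.flatMap_cons]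

lemma row_canon (x y r dx : Int) :
    ((PySem.List.pyRange (-r) (r + 1) 1).filter
        (fun dy => pyInside (x + dx) (y + dy))).map (fun dy => ((x + dx : Int), (y + dy : Int))) =
      if decide (0 ≤ x + dx ∧ x + dx < 13) then
        ((PySem.List.pyRange (max (-r) (-y)) (min (r + 1) (13 - y)) 1).map
          (fun dy => (x + dx, y + dy)))
      else [] := by
  rw [show (fun dy => pyInside (x + dx) (y + dy)) =
        (fun dy => decide (0 ≤ x + dx ∧ x + dx < 13) && decide (0 ≤ y + dy ∧ y + dy < 13)) from rfl]
  rw [filter_and_const]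
  rw [apply_ite (List.map (fun dy => ((x + dx : Int), (y + dy : Int))))]
  rw [List.filter_congr (fun dy _ => by
        simp only [decide_eq_decide]
        omega :
      ∀ dy ∈ PySem.List.pyRange (-r) (r + 1) 1,
        decide (0 ≤ y + dy ∧ y + dy < 13) = decide ((-y) ≤ dy ∧ dy < 13 - y))]
  rw [filter_inter (-y) (13 - y) _ _ _ rfl]
  rfl

lemma disc_eq (x y r : Int)
    (hm : moorePort r = pvGrid (-r) (r + 1) (-r) (r + 1)) :
    translatePort (x, y) (moorePort r) =
      pvGrid (max (x - r) 0) (min (x + r + 1) 13) (max (y - r) 0) (min (y + r + 1) 13) := by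
  rw [hm]
  unfold pvGrid
  rw [translate_grid]
  rw [fm_congr (fun dx _ => row_canon x y r dx)]
  rw [flatMap_if]
  rw [List.filter_congr (fun dx _ => by
        simp only [decide_eq_decide]
        omega :
      ∀ dx ∈ PySem.List.pyRange (-r) (r + 1) 1,
        decide (0 ≤ x + dx ∧ x + dx < 13) = decide ((-x) ≤ dx ∧ dx < 13 - x))]
  rw [filter_inter (-x) (13 - x) _ _ _ rfl]
  rw [show (PySem.List.pyRange (max (-r) (-y)) (min (r + 1) (13 - y)) 1) =
        (PySem.List.pyRange (max (-r) (-y)) (min (r + 1) (13 - y)) 1) from rfl,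
      shift_grid x y]
  rw [map_shift, map_shift]
  have e1 : x + max (-r) (-x) = max (x - r) 0 := by omega
  have e2 : x + min (r + 1) (13 - x) = min (x + r + 1) 13 := by omega
  have e3 : y + max (-r) (-y) = max (y - r) 0 := by omega
  have e4 : y + min (r + 1) (13 - y) = min (y + r + 1) 13 := by omega
  rw [e1, e2, e3, e4]

lemma row_canon_alt (x y r cx : Int) :
    ((PySem.List.pyRange 0 13 1).filter
        (fun cy => decide (max |cx - x| |cy - y| ≤ r))).map (fun cy => ((cx : Int), cy)) =
      if decide (x - r ≤ cx ∧ cx < x + r + 1) then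
        ((PySem.List.pyRange (max 0 (y - r)) (min 13 (y + r + 1)) 1).map (fun cy => (cx, cy)))
      else [] := by
  rw [List.filter_congr (fun cy _ => by
        rw [show decide (max |cx - x| |cy - y| ≤ r)
              = decide ((x - r ≤ cx ∧ cx < x + r + 1) ∧ (y - r ≤ cy ∧ cy < y + r + 1)) from
            decide_eq_decide.mpr (by rw [max_le_iff, abs_le, abs_le]; omega)]
        exact Bool.decide_and _ _ :
      ∀ cy ∈ PySem.List.pyRange 0 13 1,
        decide (max |cx - x| |cy - y| ≤ r)
          = (decide (x - r ≤ cx ∧ cx < x + r + 1) && decide (y - r ≤ cy ∧ cy < y + r + 1)))]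
  rw [filter_and_const]
  rw [apply_ite (List.map (fun cy => ((cx : Int), cy)))]
  rw [filter_inter (y - r) (y + r + 1) _ _ _ rfl]
  rfl

lemma disc_alt (x y r : Int) :
    ((PySem.List.pyRange 0 13 1).flatMap (fun cx =>
      ((PySem.List.pyRange 0 13 1).filter
          (fun cy => decide (max |cx - x| |cy - y| ≤ r))).map (fun cy => (cx, cy)))) =
      pvGrid (max (x - r) 0) (min (x + r + 1) 13) (max (y - r) 0) (min (y + r + 1) 13) := by
  rw [fm_congr (fun cx _ => row_canon_alt x y r cx)]
  rw [flatMap_if]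
  rw [filter_inter (x - r) (x + r + 1) _ _ _ rfl]
  unfold pvGrid
  have e1 : max (0 : Int) (x - r) = max (x - r) 0 := by omega
  have e2 : min (13 : Int) (x + r + 1) = min (x + r + 1) 13 := by omega
  have e3 : max (0 : Int) (y - r) = max (y - r) 0 := by omega
  have e4 : min (13 : Int) (y + r + 1) = min (y + r + 1) 13 := by omega
  rw [e1, e2, e3, e4]

lemma update_filter_foldl {α β : Type} [BEq β] (P : α → Bool) (F : α → β)
    (l : List α) (z : List β) :
    PySem.Set.update z ((l.filter P).map F) =
      l.foldl (fun z o => if P o then PySem.Set.add z (F o) else z) z := by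
  induction l generalizing z with
  | nil => rfl
  | cons a l ih =>
    rw [List.filter_cons, List.foldl_cons]
    by_cases h : P a = true
    · simp only [h, if_true, List.map_cons]
      have : PySem.Set.update z (F a :: (l.filter P).map F)
           = PySem.Set.update (PySem.Set.add z (F a)) ((l.filter P).map F) := rfl
      rw [this, ih]
    · simp only [h, if_false, Bool.false_eq_true]
      exact ih z

-- ===== VERDICT (by name: the statement is the Claim_ definition above) =====
theorem nazgul_zone_spec : Claim_equal_nazgul_zone := by
  intro pos ring_on has_coat _
  unfold Spec_nazgul_zone
  obtain ⟨x, y⟩ := pos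
  have hm2 : moorePort 2 = pvGrid (-2) (2 + 1) (-2) (2 + 1) := by decide
  have hm1 : moorePort 1 = pvGrid (-1) (1 + 1) (-1) (1 + 1) := by decide
  cases ring_on with
  | true =>
    simp only [nazgul_zone, nazgul_zone_alt, Bool.true_or, if_true]
    rw [disc_eq x y 2 hm2, disc_alt x y 2]
    simp only [translatePort]
    rw [update_filter_foldl]
    simp [pyInside, List.foldl_cons, List.foldl_nil]
  | false =>
    cases has_coat with
    | true =>
      simp only [nazgul_zone, nazgul_zone_alt, Bool.false_or, Bool.not_true, Bool.false_eq_true, if_true, if_false]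
      rw [disc_eq x y 1 hm1, disc_alt x y 1]
    | false =>
      simp only [nazgul_zone, nazgul_zone_alt, Bool.false_or, Bool.not_false, Bool.false_eq_true, if_true, if_false]
      rw [disc_eq x y 1 hm1, disc_alt x y 1]
      simp only [translatePort]
      rw [update_filter_foldl]
      simp [pyInside, List.foldl_cons, List.foldl_nil]
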